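-- pv_equiv track=rewrite | github.com/happyyeon/my_algorithm | softeer/gbc.py | make_cp
-- ===== SOURCE A (Python) =====
-- def make_cp(standard,test):
--     cp = set()
--     cp_std = []
--     cp_tst = []
--     x = 0
--     for i in range(len(standard)):
--         x += standard[i][0]
--         cp_std.append(x)
--         cp.add(x)
--     x = 0
--     for i in range(len(test)):
--         x += test[i][0]
--         cp_tst.append(x)
--         cp.add(x)
--     cp = sorted(list(cp))
--     return cp,cp_std,cp_tst
-- ===== SOURCE B (Python) =====
-- def _prefix(rows):
--     out = []
--     t = 0
--     for row in rows:
--         t += row[0]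
--         out.append(t)
--     return out
--
--
-- def make_cp(standard, test):
--     cp_std = _prefix(standard)
--     cp_tst = _prefix(test)
--     a = sorted(cp_std)
--     b = sorted(cp_tst)
--     cp = []
--     i = j = 0
--     while i < len(a) or j < len(b):
--         if j >= len(b) or (i < len(a) and a[i] <= b[j]):
--             v = a[i]
--             i += 1
--         else:
--             v = b[j]
--             j += 1
--         if not cp or cp[-1] != v:
--             cp.append(v)
--     return cp, cp_std, cp_tst
-- ===== Notes on version B (the rewrite author's own statement) =====
-- stated objective: alternative
-- what changed: B keeps no set at all: it sorts the two prefix-sum lists separately and produces the checkpoint list by a two-pointer merge of the two sorted lists that skips duplicates on the fly, instead of accumulating a hash set inside the prefix loops and sorting its union.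
import Mathlib
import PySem

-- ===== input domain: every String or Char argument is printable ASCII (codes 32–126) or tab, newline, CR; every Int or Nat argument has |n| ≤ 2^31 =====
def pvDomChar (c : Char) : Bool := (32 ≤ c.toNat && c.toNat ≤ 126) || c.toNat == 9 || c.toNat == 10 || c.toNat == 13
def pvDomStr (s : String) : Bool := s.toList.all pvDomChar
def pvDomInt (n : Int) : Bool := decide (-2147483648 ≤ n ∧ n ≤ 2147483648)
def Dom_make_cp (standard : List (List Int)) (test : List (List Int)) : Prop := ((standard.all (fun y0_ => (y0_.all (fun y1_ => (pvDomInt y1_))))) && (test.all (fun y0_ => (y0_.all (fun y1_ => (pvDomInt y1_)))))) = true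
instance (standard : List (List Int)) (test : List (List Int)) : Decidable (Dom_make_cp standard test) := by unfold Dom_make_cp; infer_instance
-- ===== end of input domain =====

-- B keeps no set: it sorts the two prefix-sum lists separately and builds the checkpoint list
-- by a duplicate-skipping two-pointer merge (alternative algorithm, same asymptotic cost).

-- ===== PORT A =====
-- A's loop body: accumulate prefix sum x, append it to the list, add it to the set.
def pvStepA (st : PySem.Set Int × List Int × Int) (row : List Int) : PySem.Set Int × List Int × Int :=
  let x := st.2.2 + PySem.List.pyGetD row 0 0
  (PySem.Set.add st.1 x, st.2.1 ++ [x], x)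

def make_cp (standard : List (List Int)) (test : List (List Int)) : List Int × List Int × List Int :=
  let s1 := standard.foldl pvStepA (PySem.Set.empty, [], 0)
  let s2 := test.foldl pvStepA (s1.1, [], 0)
  (PySem.List.sorted s2.1 (fun v => v) false, s1.2.1, s2.2.1)

-- ===== PORT B =====
-- B's _prefix loop body: accumulate t, append it.
def pvStepPre (st : List Int × Int) (row : List Int) : List Int × Int :=
  let t := st.2 + PySem.List.pyGetD row 0 0
  (st.1 ++ [t], t)

def pvPrefix (rows : List (List Int)) : List Int := (rows.foldl pvStepPre ([], 0)).1

-- B's duplicate skip: append v unless it equals the last kept element.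
def pvStepDedup (cp : List Int) (v : Int) : List Int :=
  if cp = [] ∨ cp.getLast? ≠ some v then cp ++ [v] else cp

-- B's while loop: i/j suffixes of a/b, condition order as in the Python.
def pvMergeLoop (cp : List Int) : List Int → List Int → List Int
  | [], [] => cp
  | x :: xs, [] => pvMergeLoop (pvStepDedup cp x) xs []
  | [], y :: ys => pvMergeLoop (pvStepDedup cp y) [] ys
  | x :: xs, y :: ys =>
      if x ≤ y then pvMergeLoop (pvStepDedup cp x) xs (y :: ys)
      else pvMergeLoop (pvStepDedup cp y) (x :: xs) ys
termination_by a b => a.length + b.length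

def make_cp_alt (standard : List (List Int)) (test : List (List Int)) : List Int × List Int × List Int :=
  let cp_std := pvPrefix standard
  let cp_tst := pvPrefix test
  let a := PySem.List.sorted cp_std (fun v => v) false
  let b := PySem.List.sorted cp_tst (fun v => v) false
  (pvMergeLoop [] a b, cp_std, cp_tst)

-- ===== PRECONDITION & SPEC =====
-- Pre_ excludes inputs containing an empty inner list, on which Python A (and B) raises IndexError at row[0].
def Pre_make_cp (standard : List (List Int)) (test : List (List Int)) : Prop :=
  (standard.all (fun r => !r.isEmpty) && test.all (fun r => !r.isEmpty)) = true
instance (standard : List (List Int)) (test : List (List Int)) : Decidable (Pre_make_cp standard test) := by unfold Pre_make_cp; infer_instance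

def pvWitness_make_cp : List (List Int) × List (List Int) := ([[1], [2, 5]], [[3], [-1]])

def Spec_make_cp (standard : List (List Int)) (test : List (List Int)) (out : List Int × List Int × List Int) : Prop := out = make_cp_alt standard test
instance (standard : List (List Int)) (test : List (List Int)) (out : List Int × List Int × List Int) : Decidable (Spec_make_cp standard test out) := by unfold Spec_make_cp; infer_instance

-- ===== CLAIM (what is proved, stated in full; the proofs are below) =====
def Claim_equal_make_cp : Prop := ∀ (standard : List (List Int)) (test : List (List Int)), Dom_make_cp standard test → Pre_make_cp standard test → Spec_make_cp standard test (make_cp standard test)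

-- ===== LEMMAS AND PROOFS =====

-- plain merge of two lists (no dedup), used only to reason about pvMergeLoop
def pvMerge : List Int → List Int → List Int
  | [], [] => []
  | x :: xs, [] => x :: pvMerge xs []
  | [], y :: ys => y :: pvMerge [] ys
  | x :: xs, y :: ys =>
      if x ≤ y then x :: pvMerge xs (y :: ys) else y :: pvMerge (x :: xs) ys
termination_by a b => a.length + b.length

theorem pvMergeLoop_foldl (a b : List Int) :
    ∀ cp, pvMergeLoop cp a b = (pvMerge a b).foldl pvStepDedup cp := by
  fun_induction pvMerge a b with
  | case1 => intro cp; simp [pvMergeLoop]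
  | case2 x xs ih => intro cp; simp [pvMergeLoop, ih]
  | case3 y ys ih => intro cp; simp [pvMergeLoop, ih]
  | case4 x xs y ys h ih => intro cp; simp [pvMergeLoop, h, ih]
  | case5 x xs y ys h ih => intro cp; simp [pvMergeLoop, h, ih]

theorem pvMerge_perm (a b : List Int) : (pvMerge a b).Perm (a ++ b) := by
  fun_induction pvMerge a b with
  | case1 => simp
  | case2 x xs ih => simpa [pvMerge] using ih.cons x
  | case3 y ys ih => simpa [pvMerge] using ih.cons y
  | case4 x xs y ys h ih => simpa [pvMerge, h] using ih.cons x
  | case5 x xs y ys h ih =>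
      simpa [pvMerge, h] using (ih.cons y).trans
        (List.perm_middle (a := y) (l₁ := x :: xs) (l₂ := ys)).symm

theorem pvMerge_pairwise (a b : List Int)
    (ha : a.Pairwise (· ≤ ·)) (hb : b.Pairwise (· ≤ ·)) :
    (pvMerge a b).Pairwise (· ≤ ·) := by
  fun_induction pvMerge a b with
  | case1 => simp
  | case2 x xs ih =>
      rw [List.pairwise_cons] at ha
      refine List.pairwise_cons.2 ⟨?_, ih ha.2 hb⟩
      intro z hz
      have := (pvMerge_perm xs []).mem_iff.1 hz
      exact ha.1 z (by simpa using this)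
  | case3 y ys ih =>
      rw [List.pairwise_cons] at hb
      refine List.pairwise_cons.2 ⟨?_, ih ha hb.2⟩
      intro z hz
      have := (pvMerge_perm [] ys).mem_iff.1 hz
      exact hb.1 z (by simpa using this)
  | case4 x xs y ys h ih =>
      rw [List.pairwise_cons] at ha
      refine List.pairwise_cons.2 ⟨?_, ih ha.2 hb⟩
      intro z hz
      have hz' := (pvMerge_perm xs (y :: ys)).mem_iff.1 hz
      rcases List.mem_append.1 hz' with h1 | h2
      · exact ha.1 z h1
      · rcases List.mem_cons.1 h2 with rfl | h3
        · exact h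
        · exact le_trans h ((List.pairwise_cons.1 hb).1 z h3)
  | case5 x xs y ys h ih =>
      rw [List.pairwise_cons] at hb
      refine List.pairwise_cons.2 ⟨?_, ih ha hb.2⟩
      intro z hz
      have hy : y ≤ x := le_of_lt (lt_of_not_ge h)
      have hz' := (pvMerge_perm (x :: xs) ys).mem_iff.1 hz
      rcases List.mem_append.1 hz' with h1 | h2
      · rcases List.mem_cons.1 h1 with rfl | h3
        · exact hy
        · exact le_trans hy ((List.pairwise_cons.1 ha).1 z h3)
      · exact hb.1 z h2

-- the merge of the two sorted halves IS sorted(concatenation)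
theorem pvMerge_sorted_eq (p q : List Int) :
    pvMerge (PySem.List.sorted p (fun v => v) false) (PySem.List.sorted q (fun v => v) false)
      = PySem.List.sorted (p ++ q) (fun v => v) false := by
  have hperm : (pvMerge (PySem.List.sorted p (fun v => v) false)
      (PySem.List.sorted q (fun v => v) false)).Perm (p ++ q) := by
    refine (pvMerge_perm _ _).trans ?_
    exact (PySem.List.sorted_perm _ _ _).append (PySem.List.sorted_perm _ _ _)
  have hpw : (pvMerge (PySem.List.sorted p (fun v => v) false)
      (PySem.List.sorted q (fun v => v) false)).Pairwise (· ≤ ·) :=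
    pvMerge_pairwise _ _ (PySem.List.sorted_pairwise _ _) (PySem.List.sorted_pairwise _ _)
  exact (PySem.List.sorted_id_eq_of_perm_of_pairwise _ _ hperm hpw).symm

-- the list-and-running-sum components of A's fold are exactly B's prefix fold
theorem pvFoldA_proj (rows : List (List Int)) :
    ∀ (s : PySem.Set Int) (l : List Int) (x : Int),
      (rows.foldl pvStepA (s, l, x)).2 = rows.foldl pvStepPre (l, x) := by
  induction rows with
  | nil => intro s l x; rfl
  | cons r rs ih => intro s l x; simpa [pvStepA, pvStepPre] using ih _ _ _

-- B's prefix fold splits off its accumulator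
theorem pvFoldPre_append (rows : List (List Int)) :
    ∀ (l : List Int) (x : Int),
      rows.foldl pvStepPre (l, x) =
        (l ++ (rows.foldl pvStepPre ([], x)).1, (rows.foldl pvStepPre ([], x)).2) := by
  induction rows with
  | nil => intro l x; simp
  | cons r rs ih =>
      intro l x
      simp only [List.foldl_cons, pvStepPre, List.nil_append]
      rw [ih (l ++ [x + PySem.List.pyGetD r 0 0]), ih [x + PySem.List.pyGetD r 0 0]]
      simp

-- the set component of A's fold is the running set updated with the produced prefix sums
theorem pvFoldA_set (rows : List (List Int)) :
    ∀ (s : PySem.Set Int) (l : List Int) (x : Int),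
      (rows.foldl pvStepA (s, l, x)).1 =
        PySem.Set.update s (rows.foldl pvStepPre ([], x)).1 := by
  induction rows with
  | nil => intro s l x; rfl
  | cons r rs ih =>
      intro s l x
      simp only [List.foldl_cons, pvStepA, pvStepPre, List.nil_append]
      rw [ih, pvFoldPre_append rs [x + PySem.List.pyGetD r 0 0]]
      simp [PySem.Set.update]

-- B's dedup fold is destuttering by disequality
theorem pvDedup_destutter' (l : List Int) :
    ∀ (pre : List Int) (a : Int),
      l.foldl pvStepDedup (pre ++ [a]) = pre ++ l.destutter' (· ≠ ·) a := by
  induction l with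
  | nil => intro pre a; simp
  | cons b t ih =>
      intro pre a
      by_cases hab : a = b
      · subst hab
        have : pvStepDedup (pre ++ [a]) a = pre ++ [a] := by
          simp [pvStepDedup]
        simp only [List.foldl_cons, this, ih]
        rw [List.destutter'_cons_neg (R := (· ≠ ·)) (h := show ¬ a ≠ a by simp)]
      · have : pvStepDedup (pre ++ [a]) b = (pre ++ [a]) ++ [b] := by
          simp [pvStepDedup, hab]
        simp only [List.foldl_cons, this]
        rw [ih (pre ++ [a]) b, List.destutter'_cons_pos (R := (· ≠ ·)) (h := show a ≠ b from hab)]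
        simp

theorem pvDedup_destutter (l : List Int) :
    l.foldl pvStepDedup [] = l.destutter (· ≠ ·) := by
  cases l with
  | nil => rfl
  | cons c cs =>
      have h0 : pvStepDedup [] c = [] ++ [c] := by simp [pvStepDedup]
      simp only [List.foldl_cons, h0, pvDedup_destutter' cs [] c]
      simp [List.destutter_cons']

-- the central fact: sorted(set(M)) = adjacent-dedup of sorted(M)
theorem pv_sorted_set_eq_dedup (M : List Int) :
    PySem.List.sorted (PySem.Set.ofList M) (fun v => v) false =
      (PySem.List.sorted M (fun v => v) false).foldl pvStepDedup [] := by
  rw [pvDedup_destutter]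
  set S := PySem.List.sorted M (fun v => v) false with hS
  have hP : S.Pairwise (fun a b => a ≤ b) := PySem.List.sorted_pairwise M (fun v => v)
  have hdd : S.destutter (· ≠ ·) = S.dedup := List.Pairwise.destutter_eq_dedup hP
  rw [hdd]
  apply PySem.List.sorted_eq_of_perm_of_pairwise_lt
  · refine (List.perm_ext_iff_of_nodup (List.nodup_dedup S) (PySem.Set.nodup_ofList M)).2 ?_
    intro a
    simp [PySem.Set.mem_ofList, hS, PySem.List.mem_sorted]
  · have hle : S.dedup.Pairwise (fun a b => a ≤ b) := hP.sublist (List.dedup_sublist S)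
    have hne : S.dedup.Pairwise (fun a b => a ≠ b) := List.nodup_dedup S
    exact (hle.and hne).imp fun h => lt_of_le_of_ne h.1 h.2

-- ===== VERDICT (by name: the statement is the Claim_ definition above) =====
theorem make_cp_spec : Claim_equal_make_cp := by
  intro standard test _ _
  unfold Spec_make_cp make_cp make_cp_alt
  have h1 := pvFoldA_proj standard PySem.Set.empty [] 0
  have h2 := pvFoldA_proj test (standard.foldl pvStepA (PySem.Set.empty, [], 0)).1 [] 0
  have hset1 := pvFoldA_set standard PySem.Set.empty [] 0
  have hset2 := pvFoldA_set test (standard.foldl pvStepA (PySem.Set.empty, [], 0)).1 [] 0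
  refine Prod.ext ?_ (Prod.ext ?_ ?_)
  · show PySem.List.sorted
        (test.foldl pvStepA ((standard.foldl pvStepA (PySem.Set.empty, [], 0)).1, [], 0)).1
        (fun v => v) false =
      pvMergeLoop [] (PySem.List.sorted (pvPrefix standard) (fun v => v) false)
        (PySem.List.sorted (pvPrefix test) (fun v => v) false)
    rw [hset2, hset1]
    have hof : PySem.Set.update (PySem.Set.update PySem.Set.empty (pvPrefix standard)) (pvPrefix test)
        = PySem.Set.ofList (pvPrefix standard ++ pvPrefix test) := by
      simp [PySem.Set.update, PySem.Set.ofList_eq_foldl, PySem.Set.empty, List.foldl_append]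
    show PySem.List.sorted (PySem.Set.update (PySem.Set.update PySem.Set.empty
        (pvPrefix standard)) (pvPrefix test)) (fun v => v) false = _
    rw [hof, pv_sorted_set_eq_dedup, pvMergeLoop_foldl, pvMerge_sorted_eq]
  · show (standard.foldl pvStepA (PySem.Set.empty, [], 0)).2.1 = pvPrefix standard
    rw [h1]; rfl
  · show (test.foldl pvStepA
        ((standard.foldl pvStepA (PySem.Set.empty, [], 0)).1, [], 0)).2.1 = pvPrefix test
    rw [h2]; rfl
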